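-- pv_equiv track=rewrite | github.com/chauhanswapnil/Coding-Challenges | KickStart/InterestingIntegers.py | get_product_and_sum
-- ===== SOURCE A (Python) =====
-- def get_product_and_sum(n):
--     p = 1
--     s = 0
--     while (n != 0):
--         p = p * (n%10)
--         s = s + (n%10)
--         n = n//10
--     return (p,s)
-- ===== SOURCE B (Python) =====
-- def get_product_and_sum(n):
--     # decimal digits straight from the string representation: no arithmetic extraction
--     p = 1
--     s = 0
--     for c in str(n):
--         d = ord(c) - 48
--         p *= d
--         s += d
--     return (p, s)
-- ===== Notes on version B (the rewrite author's own statement) =====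
-- stated objective: alternative
-- what changed: B reads the decimal digits from str(n) and folds over the characters, replacing A's %10///10 arithmetic extraction loop entirely.
-- outside the precondition, e.g. on get_product_and_sum(0): A returns (1, 0), B returns (0, 0)
import Mathlib
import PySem

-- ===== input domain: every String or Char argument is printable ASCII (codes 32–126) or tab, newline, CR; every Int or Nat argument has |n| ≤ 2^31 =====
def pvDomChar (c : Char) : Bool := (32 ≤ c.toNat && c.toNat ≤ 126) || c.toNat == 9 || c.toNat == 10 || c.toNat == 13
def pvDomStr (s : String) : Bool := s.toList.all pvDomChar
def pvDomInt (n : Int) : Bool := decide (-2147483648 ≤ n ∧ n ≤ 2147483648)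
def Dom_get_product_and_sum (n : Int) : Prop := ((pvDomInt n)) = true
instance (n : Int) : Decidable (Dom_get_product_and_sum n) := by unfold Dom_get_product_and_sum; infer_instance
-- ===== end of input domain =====

-- B reads the decimal digits from str(n) and folds over the characters, replacing A's
-- %10 // 10 arithmetic extraction loop (objective: alternative algorithm, same cost).
-- Pre_ excludes n = 0, where A's (1, 0) (empty product) and B's (0, 0) (the digit '0')
-- are both defensible, and n < 0, where A never returns (its loop does not terminate).


-- ===== PORT A =====
-- A's while loop; the condition is `n != 0`; for n < 0 Python never terminates
-- (n // 10 stabilises at -1), so the n ≤ 0 guard only makes the recursion total.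
def paLoop (p s n : Int) : Int × Int :=
  if n ≤ 0 then (p, s)
  else paLoop (p * PySem.Int.mod n 10) (s + PySem.Int.mod n 10) (PySem.Int.floordiv n 10)
termination_by n.toNat
decreasing_by
  rw [PySem.Int.floordiv_eq_ediv_of_pos (by omega)]
  omega

def get_product_and_sum (n : Int) : Int × Int := paLoop 1 0 n

-- ===== PORT B =====
-- Source B: `for c in str(n): d = ord(c) - 48; p *= d; s += d` as a fold over str(n)
def get_product_and_sum_alt (n : Int) : Int × Int :=
  (PySem.Int.toStr n).toList.foldl
    (fun ps c => (ps.1 * ((c.toNat : Int) - 48), ps.2 + ((c.toNat : Int) - 48))) (1, 0)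

-- ===== PRECONDITION & SPEC =====
-- Pre_ excludes n < 0 (A's while loop never terminates there) and n = 0, where A
-- returns (1, 0) by the empty-product convention while str(0) = "0" gives B (0, 0):
-- both are defensible readings of "product and sum of the digits of 0".
def Pre_get_product_and_sum (n : Int) : Prop := 0 < n
instance (n : Int) : Decidable (Pre_get_product_and_sum n) := by unfold Pre_get_product_and_sum; infer_instance
def pvWitness_get_product_and_sum : Int := 12

def Spec_get_product_and_sum (n : Int) (out : Int × Int) : Prop := out = get_product_and_sum_alt n
instance (n : Int) (out : Int × Int) : Decidable (Spec_get_product_and_sum n out) := by unfold Spec_get_product_and_sum; infer_instance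

-- ===== CLAIM =====
def Claim_equal_get_product_and_sum : Prop := ∀ (n : Int), Dom_get_product_and_sum n → Pre_get_product_and_sum n → Spec_get_product_and_sum n (get_product_and_sum n)

-- ===== LEMMAS AND PROOFS =====

-- digit product / digit sum of a positive integer, little-endian recursion like A's loop
def dProd (n : Int) : Int :=
  if n ≤ 0 then 1 else dProd (PySem.Int.floordiv n 10) * PySem.Int.mod n 10
termination_by n.toNat
decreasing_by
  rw [PySem.Int.floordiv_eq_ediv_of_pos (by omega)]
  omega

def dSum (n : Int) : Int :=
  if n ≤ 0 then 0 else dSum (PySem.Int.floordiv n 10) + PySem.Int.mod n 10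
termination_by n.toNat
decreasing_by
  rw [PySem.Int.floordiv_eq_ediv_of_pos (by omega)]
  omega

theorem paLoop_eq (p s n : Int) : paLoop p s n = (p * dProd n, s + dSum n) := by
  by_cases h : n ≤ 0
  · rw [paLoop, dProd, dSum]; simp [h]
  · rw [paLoop, dProd, dSum]
    simp only [h, if_false]
    rw [paLoop_eq]
    rw [Prod.mk.injEq]
    constructor <;> ring
termination_by n.toNat
decreasing_by
  rw [PySem.Int.floordiv_eq_ediv_of_pos (by omega)]
  omega

-- fuel irrelevance for Nat.toDigitsCore (base 10)
theorem tdc_fuel (f f' n : Nat) (l : List Char) (h : n < f) (h' : n < f') :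
    Nat.toDigitsCore 10 f n l = Nat.toDigitsCore 10 f' n l := by
  induction f generalizing f' n l with
  | zero => omega
  | succ f ih =>
    cases f' with
    | zero => omega
    | succ f' =>
      simp only [Nat.toDigitsCore]
      by_cases hz : n / 10 = 0
      · simp [hz]
      · simp only [hz, if_false]
        exact ih f' (n / 10) _ (by omega) (by omega)

-- accumulator lemma
theorem tdc_acc (f n : Nat) (l : List Char) (h : n < f) :
    Nat.toDigitsCore 10 f n l = Nat.toDigitsCore 10 f n [] ++ l := by
  induction f generalizing n l with
  | zero => omega
  | succ f ih =>
    simp only [Nat.toDigitsCore]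
    by_cases hz : n / 10 = 0
    · simp [hz]
    · simp only [hz, if_false]
      rw [ih (n / 10) _ (by omega), ih (n / 10) [Nat.digitChar (n % 10)] (by omega),
        List.append_assoc]
      simp

theorem toDigits_step (n : Nat) (h : 10 ≤ n) :
    Nat.toDigits 10 n = Nat.toDigits 10 (n / 10) ++ [Nat.digitChar (n % 10)] := by
  have hz : ¬ n / 10 = 0 := by omega
  unfold Nat.toDigits
  rw [show (n + 1) = (n) + 1 from rfl]
  simp only [Nat.toDigitsCore, hz, if_false]
  rw [tdc_acc n (n / 10) _ (by omega)]
  congr 1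
  exact tdc_fuel n (n / 10 + 1) (n / 10) [] (by omega) (by omega)

theorem toDigits_small (n : Nat) (h : n < 10) :
    Nat.toDigits 10 n = [Nat.digitChar n] := by
  unfold Nat.toDigits
  simp [Nat.toDigitsCore, Nat.div_eq_of_lt h, Nat.mod_eq_of_lt h]

theorem digitChar_val (d : Nat) (h : d < 10) :
    ((Nat.digitChar d).toNat : Int) - 48 = (d : Int) := by
  interval_cases d <;> decide

-- the B fold over a character list
def bStep (ps : Int × Int) (c : Char) : Int × Int :=
  (ps.1 * ((c.toNat : Int) - 48), ps.2 + ((c.toNat : Int) - 48))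

theorem bFold_toDigits (m : Nat) (hm : 0 < m) (p s : Int) :
    (Nat.toDigits 10 m).foldl bStep (p, s) = (p * dProd (m : Int), s + dSum (m : Int)) := by
  by_cases h : m < 10
  · rw [toDigits_small m h]
    have h10 : PySem.Int.floordiv (m : Int) 10 = ((m / 10 : Nat) : Int) :=
      PySem.Int.floordiv_natCast m 10
    have hmod : PySem.Int.mod (m : Int) 10 = ((m % 10 : Nat) : Int) :=
      PySem.Int.mod_natCast m 10
    rw [dProd, dSum]
    have hpos : ¬ ((m : Int) ≤ 0) := by omega
    simp only [hpos, if_false, h10, hmod]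
    rw [dProd, dSum]
    have : (m / 10 : Nat) = 0 := by omega
    rw [this]
    have : (m % 10 : Nat) = m := by omega
    rw [this]
    simp [List.foldl, bStep, digitChar_val m h]
  · rw [toDigits_step m (by omega), List.foldl_append]
    rw [bFold_toDigits (m / 10) (by omega) p s]
    have h10 : PySem.Int.floordiv (m : Int) 10 = ((m / 10 : Nat) : Int) :=
      PySem.Int.floordiv_natCast m 10
    have hmod : PySem.Int.mod (m : Int) 10 = ((m % 10 : Nat) : Int) :=
      PySem.Int.mod_natCast m 10
    conv_rhs => rw [dProd, dSum]
    have hpos : ¬ ((m : Int) ≤ 0) := by omega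
    simp only [hpos, if_false, h10, hmod]
    simp [List.foldl, bStep, digitChar_val (m % 10) (by omega)]
    constructor <;> ring
termination_by m
decreasing_by omega

-- ===== VERDICT =====
theorem get_product_and_sum_spec : Claim_equal_get_product_and_sum := by
  intro n _ hpre
  unfold Pre_get_product_and_sum at hpre
  unfold Spec_get_product_and_sum get_product_and_sum get_product_and_sum_alt
  have hneg : ¬ (n < 0) := by omega
  rw [PySem.Int.toList_toStr]
  unfold PySem.Int.toChars
  simp only [hneg, if_false]
  have hfold : ∀ (l : List Char) (init : Int × Int),
      l.foldl (fun ps c => (ps.1 * ((c.toNat : Int) - 48), ps.2 + ((c.toNat : Int) - 48))) init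
        = l.foldl bStep init := by
    intro l init; rfl
  rw [hfold]
  rw [bFold_toDigits n.toNat (by omega) 1 0]
  rw [paLoop_eq]
  have : ((n.toNat : Nat) : Int) = n := by omega
  rw [this]
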